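-- pv_equiv track=rewrite | github.com/KarthikRaghavK/Chronic-Disease-Prevention-Tracker | utils/alerts.py | get_alert_recommendations
-- ===== SOURCE A (Python) =====
-- def get_alert_recommendations(alerts):
--     """Get consolidated recommendations from alerts"""
--     recommendations = []
--
--     # Group alerts by metric
--     metric_alerts = {}
--     for alert in alerts:
--         metric = alert.get('metric', 'general')
--         if metric not in metric_alerts:
--             metric_alerts[metric] = []
--         metric_alerts[metric].append(alert)
--
--     # Generate recommendations
--     for metric, alerts_list in metric_alerts.items():
--         if len(alerts_list) > 1:
--             # Multiple alerts for same metric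
--             severity_levels = [alert['severity'] for alert in alerts_list]
--             if 'Critical' in severity_levels:
--                 recommendations.append({
--                     'priority': 'Critical',
--                     'metric': metric,
--                     'recommendation': f'Immediate medical attention required for {metric.replace("_", " ")}'
--                 })
--             elif 'Warning' in severity_levels:
--                 recommendations.append({
--                     'priority': 'High',
--                     'metric': metric,
--                     'recommendation': f'Monitor {metric.replace("_", " ")} closely and consider intervention'
--                 })
--         else:
--             # Single alert
--             alert = alerts_list[0]
--             recommendations.append({
--                 'priority': alert['severity'],
--                 'metric': metric,
--                 'recommendation': alert['recommendation']
--             })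
--
--     return recommendations
-- ===== SOURCE B (Python) =====
-- def _critical_rec(metric):
--     return {
--         'priority': 'Critical',
--         'metric': metric,
--         'recommendation': f'Immediate medical attention required for {metric.replace("_", " ")}'
--     }
--
--
-- def _high_rec(metric):
--     return {
--         'priority': 'High',
--         'metric': metric,
--         'recommendation': f'Monitor {metric.replace("_", " ")} closely and consider intervention'
--     }
--
--
-- def _single_rec(metric, alert):
--     return {
--         'priority': alert['severity'],
--         'metric': metric,
--         'recommendation': alert['recommendation']
--     }
--
--
-- def get_alert_recommendations(alerts):
--     """Get consolidated recommendations from alerts (dict-free: dedup metrics, then filter per metric)"""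
--     metrics = list(dict.fromkeys(a.get('metric', 'general') for a in alerts))
--     out = []
--     for m in metrics:
--         group = [a for a in alerts if a.get('metric', 'general') == m]
--         if len(group) == 1:
--             out.append(_single_rec(m, group[0]))
--         else:
--             sevs = {a['severity'] for a in group}
--             if 'Critical' in sevs:
--                 out.append(_critical_rec(m))
--             elif 'Warning' in sevs:
--                 out.append(_high_rec(m))
--     return out
-- ===== Notes on version B (the rewrite author's own statement) =====
-- stated objective: alternative
-- what changed: Drops A's dict-of-full-alert-lists grouping entirely: B first computes the ordered distinct metrics with dict.fromkeys, then for each metric filters the alert list directly and decides via a severity set, emitting through small record-constructor helpers.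
import Mathlib
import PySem

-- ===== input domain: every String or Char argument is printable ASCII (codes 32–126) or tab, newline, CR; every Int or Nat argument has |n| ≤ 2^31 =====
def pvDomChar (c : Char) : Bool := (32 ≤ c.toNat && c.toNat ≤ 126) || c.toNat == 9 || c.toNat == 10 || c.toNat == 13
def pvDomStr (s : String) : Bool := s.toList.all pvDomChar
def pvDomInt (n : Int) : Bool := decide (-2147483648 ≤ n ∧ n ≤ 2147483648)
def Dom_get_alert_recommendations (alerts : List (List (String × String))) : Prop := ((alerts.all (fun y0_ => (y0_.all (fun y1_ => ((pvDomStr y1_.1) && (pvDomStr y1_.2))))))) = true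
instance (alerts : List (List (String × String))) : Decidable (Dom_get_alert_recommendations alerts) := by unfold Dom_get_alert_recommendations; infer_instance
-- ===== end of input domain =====

-- B drops A's dict-of-alert-lists grouping: it dedups the metric names, then filters
-- the alert list per metric and decides via a severity set; same outputs, same order.

-- alert.get('metric', 'general') — shared reading of one input field (not part of either algorithm)
def pvMetricOf (a : List (String × String)) : String :=
  (PySem.Dict.mk a).getD "metric" "general"
-- alert['severity'] read totally; "" stands for the KeyError Pre_ excludes
def pvSevOf (a : List (String × String)) : String :=
  (PySem.Dict.mk a).getD "severity" ""
-- alert['recommendation'] read totally; "" stands for the KeyError Pre_ excludes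
def pvRecOf (a : List (String × String)) : String :=
  (PySem.Dict.mk a).getD "recommendation" ""

-- ===== PORT A =====
def get_alert_recommendations (alerts : List (List (String × String))) : List (List (String × String)) :=
  -- group alerts by metric: `if metric not in d: d[metric] = []` + append == modify with default []
  let metric_alerts : PySem.Dict String (List (List (String × String))) :=
    alerts.foldl (fun d alert => d.modify (pvMetricOf alert) [] (fun l => l ++ [alert]))
      PySem.Dict.empty
  metric_alerts.items.foldl (fun recommendations p =>
    let metric := p.1
    let alerts_list := p.2
    if 1 < alerts_list.length then
      let severity_levels := alerts_list.map (fun alert => pvSevOf alert)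
      if severity_levels.contains "Critical" then
        recommendations ++ [[("priority", "Critical"), ("metric", metric),
          ("recommendation", "Immediate medical attention required for " ++ PySem.Str.replace metric "_" " ")]]
      else if severity_levels.contains "Warning" then
        recommendations ++ [[("priority", "High"), ("metric", metric),
          ("recommendation", "Monitor " ++ PySem.Str.replace metric "_" " " ++ " closely and consider intervention")]]
      else recommendations
    else
      -- alerts_list[0]; every list in the grouping dict is nonempty, so headD is exact
      let alert := alerts_list.headD []
      recommendations ++ [[("priority", pvSevOf alert), ("metric", metric),
        ("recommendation", pvRecOf alert)]]) []

-- ===== PORT B =====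
-- B-side record constructors (helpers of Source B)
def pvCriticalRec (metric : String) : List (String × String) :=
  [("priority", "Critical"), ("metric", metric),
   ("recommendation", "Immediate medical attention required for " ++ PySem.Str.replace metric "_" " ")]
def pvHighRec (metric : String) : List (String × String) :=
  [("priority", "High"), ("metric", metric),
   ("recommendation", "Monitor " ++ PySem.Str.replace metric "_" " " ++ " closely and consider intervention")]
def pvSingleRec (metric : String) (alert : List (String × String)) : List (String × String) :=
  [("priority", pvSevOf alert), ("metric", metric), ("recommendation", pvRecOf alert)]

def get_alert_recommendations_alt (alerts : List (List (String × String))) : List (List (String × String)) :=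
  -- metrics = list(dict.fromkeys(...)); PySem.List.dedup is exactly dict.fromkeys order
  let metrics := PySem.List.dedup (alerts.map (fun a => pvMetricOf a))
  metrics.foldl (fun out m =>
    let group := alerts.filter (fun a => pvMetricOf a == m)
    if group.length == 1 then
      -- group[0]: exact, the branch guarantees one element
      out ++ [pvSingleRec m (group.headD [])]
    else
      let sevs := PySem.Set.ofList (group.map (fun a => pvSevOf a))
      if sevs.contains "Critical" then out ++ [pvCriticalRec m]
      else if sevs.contains "Warning" then out ++ [pvHighRec m]
      else out) []

-- ===== PRECONDITION & SPEC =====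
-- Pre_ excludes exactly the inputs where the Python raises KeyError: an alert without a
-- 'severity' key, or an alert that is the only one for its metric and lacks 'recommendation'.
def Pre_get_alert_recommendations (alerts : List (List (String × String))) : Prop :=
  ∀ a ∈ alerts, (PySem.Dict.mk a).contains "severity" = true ∧
    (alerts.countP (fun b => pvMetricOf b == pvMetricOf a) = 1 →
      (PySem.Dict.mk a).contains "recommendation" = true)
instance (alerts : List (List (String × String))) : Decidable (Pre_get_alert_recommendations alerts) := by
  unfold Pre_get_alert_recommendations; infer_instance

def pvWitness_get_alert_recommendations : (List (List (String × String))) :=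
  [[("metric", "blood_pressure"), ("severity", "Warning"), ("recommendation", "rest")],
   [("metric", "blood_pressure"), ("severity", "Critical")]]

def Spec_get_alert_recommendations (alerts : List (List (String × String))) (out : List (List (String × String))) : Prop := out = get_alert_recommendations_alt alerts
instance (alerts : List (List (String × String))) (out : List (List (String × String))) : Decidable (Spec_get_alert_recommendations alerts out) := by unfold Spec_get_alert_recommendations; infer_instance

-- ===== CLAIM (what is proved, stated in full; the proofs are below) =====
def Claim_equal_get_alert_recommendations : Prop := ∀ (alerts : List (List (String × String))), Dom_get_alert_recommendations alerts → Pre_get_alert_recommendations alerts → Spec_get_alert_recommendations alerts (get_alert_recommendations alerts)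

-- ===== LEMMAS AND PROOFS =====

-- A's grouping dict, characterised: keys are the deduped metrics, the value at m is the filter
theorem pv_groupDict_items (alerts : List (List (String × String))) :
    (alerts.foldl (fun d alert => d.modify (pvMetricOf alert) [] (fun l => l ++ [alert]))
       (PySem.Dict.empty : PySem.Dict String (List (List (String × String))))).items
    = (PySem.List.dedup (alerts.map (fun a => pvMetricOf a))).map
        (fun m => (m, alerts.filter (fun a => pvMetricOf a == m))) := by
  have hupd : PySem.Set.update ([] : List String) = PySem.Set.ofList := by
    funext l; rfl
  have hk : (alerts.foldl (fun d alert => d.modify (pvMetricOf alert) [] (fun l => l ++ [alert]))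
       (PySem.Dict.empty : PySem.Dict String (List (List (String × String))))).keys
      = PySem.Set.ofList (alerts.map (fun a => pvMetricOf a)) := by
    rw [PySem.Dict.keys_foldl_modify_key alerts (fun a => pvMetricOf a) []
        (fun _ alert l => l ++ [alert]) PySem.Dict.empty]
    simp [PySem.Dict.keys_empty, hupd]
  have hnd : (alerts.foldl (fun d alert => d.modify (pvMetricOf alert) [] (fun l => l ++ [alert]))
       (PySem.Dict.empty : PySem.Dict String (List (List (String × String))))).keys.Nodup := by
    exact PySem.Dict.nodup_keys_foldl_modify_key alerts (fun a => pvMetricOf a) []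
      (fun _ alert l => l ++ [alert]) PySem.Dict.empty (by simp [PySem.Dict.keys_empty])
  have hgetD : ∀ m, (alerts.foldl (fun d alert => d.modify (pvMetricOf alert) [] (fun l => l ++ [alert]))
       (PySem.Dict.empty : PySem.Dict String (List (List (String × String))))).getD m []
      = alerts.filter (fun a => pvMetricOf a == m) := by
    intro m
    have hfold : alerts.foldl (fun d alert => d.modify (pvMetricOf alert) [] (fun l => l ++ [alert]))
        (PySem.Dict.empty : PySem.Dict String (List (List (String × String))))
      = (alerts.map (fun a => (pvMetricOf a, a))).foldl
          (fun d p => d.modify p.1 [] (fun l => l ++ [p.2])) PySem.Dict.empty := by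
      rw [List.foldl_map]
    rw [hfold, PySem.Dict.getD_foldl_modify_append, PySem.Dict.getD_empty]
    simp [List.filter_map, Function.comp_def]
  rw [PySem.Dict.items_eq_map_keys _ hnd [], hk, ← PySem.List.dedup_eq_ofList]
  apply List.map_congr_left
  intro m _
  rw [hgetD]

-- ===== VERDICT (by name: the statement is the Claim_ definition above) =====
-- the two emit steps agree on a metric whose filter group is nonempty
theorem pv_emit_step (alerts : List (List (String × String))) (m : String)
    (acc : List (List (String × String)))
    (hne : alerts.filter (fun a => pvMetricOf a == m) ≠ []) :
    (let alerts_list := alerts.filter (fun a => pvMetricOf a == m)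
     if 1 < alerts_list.length then
       let severity_levels := alerts_list.map (fun alert => pvSevOf alert)
       if severity_levels.contains "Critical" then
         acc ++ [[("priority", "Critical"), ("metric", m),
           ("recommendation", "Immediate medical attention required for " ++ PySem.Str.replace m "_" " ")]]
       else if severity_levels.contains "Warning" then
         acc ++ [[("priority", "High"), ("metric", m),
           ("recommendation", "Monitor " ++ PySem.Str.replace m "_" " " ++ " closely and consider intervention")]]
       else acc
     else
       let alert := alerts_list.headD []
       acc ++ [[("priority", pvSevOf alert), ("metric", m),
         ("recommendation", pvRecOf alert)]])
    = (let group := alerts.filter (fun a => pvMetricOf a == m)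
       if group.length == 1 then
         acc ++ [pvSingleRec m (group.headD [])]
       else
         let sevs := PySem.Set.ofList (group.map (fun a => pvSevOf a))
         if sevs.contains "Critical" then acc ++ [pvCriticalRec m]
         else if sevs.contains "Warning" then acc ++ [pvHighRec m]
         else acc) := by
  set group := alerts.filter (fun a => pvMetricOf a == m) with hg
  have hset : ∀ s, (PySem.Set.ofList (group.map (fun a => pvSevOf a))).contains s
      = (group.map (fun a => pvSevOf a)).contains s := by
    intro s; simp [PySem.Set.contains, PySem.Set.mem_ofList]
  have hlen : 1 ≤ group.length := by
    rcases List.exists_cons_of_ne_nil hne with ⟨x, xs, hx⟩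
    rw [hx]; simp
  by_cases h1 : group.length = 1
  · simp only [h1]
    norm_num
    rfl
  · have hgt : 1 < group.length := by omega
    simp only [hgt, if_pos, hset]
    have : (group.length == 1) = false := by simp [h1]
    simp only [this, Bool.false_eq_true, if_false, pvCriticalRec, pvHighRec]

theorem get_alert_recommendations_spec : Claim_equal_get_alert_recommendations := by
  intro alerts _ _
  unfold Spec_get_alert_recommendations get_alert_recommendations get_alert_recommendations_alt
  dsimp only
  rw [pv_groupDict_items, List.foldl_map]
  apply PySem.List.foldl_congr_mem
  intro acc m hm
  have hmem : m ∈ alerts.map (fun a => pvMetricOf a) := by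
    rw [PySem.List.dedup_eq_ofList] at hm
    exact (PySem.Set.mem_ofList _ _).1 hm
  obtain ⟨a, ha, hma⟩ := List.mem_map.1 hmem
  have hne : alerts.filter (fun b => pvMetricOf b == m) ≠ [] := by
    intro hnil
    have : a ∈ alerts.filter (fun b => pvMetricOf b == m) :=
      List.mem_filter.2 ⟨ha, by simp [hma]⟩
    rw [hnil] at this; cases this
  exact pv_emit_step alerts m acc hne
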